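-- pv_equiv track=rewrite | github.com/HieuNguyenCode/KhaiPhaDuLieu | DinhDangChu.py | DinhDang2
-- ===== SOURCE A (Python) =====
-- def chukhacnhau(values):
--     result = []
--     for value1 in values:
--         phantudong = set()
--         for value2 in values:
--             if value1 != value2:
--                 for SoKyTu in range(1, len(value1) + 1):
--                     for layKyTu in range(len(value1) - SoKyTu + 1):
--                         value = value1[layKyTu: layKyTu + SoKyTu]
--                         if value in value2:
--                             phantudong.add(value)
--
--         phantukhacnhau = set()
--         for SoKyTu in range(1, len(value1) + 1):
--             for layKyTu in range(len(value1) - SoKyTu + 1):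
--                 value = value1[layKyTu: layKyTu + SoKyTu]
--                 if value not in phantudong:
--                     phantukhacnhau.add(value)
--
--         result.append(list(phantukhacnhau))
--     return result
--
-- def DinhDang2(value, cac_ky_tu_duoc_phep):
--     khacnhau = chukhacnhau(cac_ky_tu_duoc_phep)
--
--     value = str(value)
--     if value == 'nan':
--         return ''
--     for i in range(len(khacnhau)):
--         for j in range(len(khacnhau[i])):
--             if khacnhau[i][j] in value:
--                 value = cac_ky_tu_duoc_phep[i]
--                 break
--     return value
-- ===== SOURCE B (Python) =====
-- def _subs(s):
--     return {s[i:j] for i in range(len(s)) for j in range(i + 1, len(s) + 1)}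
--
-- def DinhDang2(value, cac_ky_tu_duoc_phep):
--     value = str(value)
--     if value == 'nan':
--         return ''
--     # one global table: substring -> number of DISTINCT input strings containing it
--     freq = {}
--     for s in dict.fromkeys(cac_ky_tu_duoc_phep):
--         for v in _subs(s):
--             freq[v] = freq.get(v, 0) + 1
--     # a group matches when one of its substrings unique to it occurs in value;
--     # keep A's mutate-and-continue loop over the groups
--     for g in cac_ky_tu_duoc_phep:
--         if any(v in value and freq[v] == 1 for v in _subs(g)):
--             value = g
--     return value
-- ===== Notes on version B (the rewrite author's own statement) =====
-- stated objective: faster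
-- what changed: Replaces the per-position all-pairs substring scans (each value's substrings re-tested against every other value) with one global frequency table counting, over the deduplicated inputs, how many distinct strings contain each substring; a group's unique substrings are then exactly those with count 1, so the quadratic pairwise pass disappears.
import Mathlib
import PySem

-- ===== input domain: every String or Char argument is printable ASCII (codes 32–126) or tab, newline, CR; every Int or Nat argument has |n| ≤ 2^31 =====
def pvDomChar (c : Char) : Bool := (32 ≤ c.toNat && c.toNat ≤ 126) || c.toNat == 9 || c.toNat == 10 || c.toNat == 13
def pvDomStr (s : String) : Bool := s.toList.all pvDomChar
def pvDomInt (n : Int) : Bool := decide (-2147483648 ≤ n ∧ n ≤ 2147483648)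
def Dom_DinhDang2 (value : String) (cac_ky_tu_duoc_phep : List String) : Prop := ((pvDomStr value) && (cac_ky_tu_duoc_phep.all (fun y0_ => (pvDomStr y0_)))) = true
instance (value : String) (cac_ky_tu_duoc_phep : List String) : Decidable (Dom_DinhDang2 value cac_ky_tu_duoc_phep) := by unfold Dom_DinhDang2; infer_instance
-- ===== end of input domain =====

-- B replaces A's per-position all-pairs substring scans with one global table counting,
-- over the deduplicated inputs, how many distinct strings contain each substring
-- (a substring is unique to a group iff its count is 1); measurably faster.


-- ===== PORT A =====
-- the nested 'for SoKyTu … for layKyTu …' slice loop A writes twice, with its body ('step') abstracted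
def pvSlicePassA (value1 : String) (step : PySem.Set String → String → PySem.Set String)
    (init : PySem.Set String) : PySem.Set String :=
  (PySem.List.pyRange 1 (PySem.Str.len value1 + 1)).foldl
    (fun pd SoKyTu =>
      (PySem.List.pyRange 0 (PySem.Str.len value1 - SoKyTu + 1)).foldl
        (fun pd layKyTu => step pd (PySem.Str.slice value1 (some layKyTu) (some (layKyTu + SoKyTu))))
        pd)
    init

-- phantudong for one value1
def pvDong (value1 : String) (values : List String) : PySem.Set String :=
  values.foldl
    (fun pd value2 =>
      if value1 == value2 then pd
      else pvSlicePassA value1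
        (fun pd v => if PySem.Str.isIn v value2 then PySem.Set.add pd v else pd) pd)
    PySem.Set.empty

-- phantukhacnhau for one value1 (the body of A's outer 'for value1 in values' loop)
def pvChuKhacOne (value1 : String) (values : List String) : List String :=
  pvSlicePassA value1
    (fun s v => if PySem.Set.contains (pvDong value1 values) v then s else PySem.Set.add s v)
    PySem.Set.empty

def chukhacnhau (values : List String) : List (List String) :=
  values.foldl (fun result value1 => result ++ [pvChuKhacOne value1 values]) []

-- 'for j in range(len(khacnhau[i])): if khacnhau[i][j] in value: value = cac[i]; break'
def pvInnerA : List String → String → String → String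
  | [], _, value => value
  | u :: rest, grp, value =>
    if PySem.Str.isIn u value then grp else pvInnerA rest grp value

def DinhDang2 (value : String) (cac_ky_tu_duoc_phep : List String) : String :=
  if value == "nan" then ""
  else
    ((chukhacnhau cac_ky_tu_duoc_phep).zip cac_ky_tu_duoc_phep).foldl
      (fun value p => pvInnerA p.1 p.2 value) value

-- ===== PORT B =====
-- _subs(s): the set of all nonempty substrings of s
def pvSubsB (s : String) : PySem.Set String :=
  (PySem.List.pyRange 0 (PySem.Str.len s)).foldl
    (fun acc i =>
      (PySem.List.pyRange (i + 1) (PySem.Str.len s + 1)).foldl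
        (fun acc j => PySem.Set.add acc (PySem.Str.slice s (some i) (some j)))
        acc)
    PySem.Set.empty

-- freq: substring -> number of distinct input strings containing it
def pvFreq (cac : List String) : PySem.Dict String Int :=
  (PySem.List.dedup cac).foldl
    (fun d s => (pvSubsB s).foldl (fun d v => PySem.Dict.modify d v 0 (fun n => n + 1)) d)
    PySem.Dict.empty

def DinhDang2_alt (value : String) (cac_ky_tu_duoc_phep : List String) : String :=
  if value == "nan" then ""
  else
    cac_ky_tu_duoc_phep.foldl
      (fun value g =>
        if (pvSubsB g).any (fun v =>
            PySem.Str.isIn v value && ((pvFreq cac_ky_tu_duoc_phep).getD v 0 == 1))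
        then g else value)
      value

-- ===== PRECONDITION & SPEC =====
def Spec_DinhDang2 (value : String) (cac_ky_tu_duoc_phep : List String) (out : String) : Prop := out = DinhDang2_alt value cac_ky_tu_duoc_phep
instance (value : String) (cac_ky_tu_duoc_phep : List String) (out : String) : Decidable (Spec_DinhDang2 value cac_ky_tu_duoc_phep out) := by unfold Spec_DinhDang2; infer_instance

-- ===== CLAIM (what is proved, stated in full; the proofs are below) =====
def Claim_equal_DinhDang2 : Prop := ∀ (value : String) (cac_ky_tu_duoc_phep : List String), Dom_DinhDang2 value cac_ky_tu_duoc_phep → Spec_DinhDang2 value cac_ky_tu_duoc_phep (DinhDang2 value cac_ky_tu_duoc_phep)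

-- ===== LEMMAS AND PROOFS =====

-- 'v is a nonempty substring of w' — the common characterisation of both enumerations
def pvNES (v w : String) : Prop := v.toList ≠ [] ∧ v.toList <:+: w.toList

-- membership in a conditional-add fold
lemma mem_foldl_addIf {β : Type} (f : β → String) (P : String → Bool) (l : List β) :
    ∀ (s : PySem.Set String) (v : String),
      (v ∈ l.foldl (fun s b => if P (f b) then PySem.Set.add s (f b) else s) s) ↔
        v ∈ s ∨ ∃ b ∈ l, f b = v ∧ P v = true := by
  induction l with
  | nil => simp
  | cons a t ih =>
    intro s v
    rw [List.foldl_cons, ih]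
    by_cases h : P (f a) = true
    · rw [if_pos h]
      constructor
      · rintro (hs | hb)
        · rcases (PySem.Set.mem_add _ _ _).mp hs with h1 | rfl
          · exact Or.inl h1
          · exact Or.inr ⟨a, by simp, rfl, h⟩
        · rcases hb with ⟨b, hbt, rfl, hp⟩
          exact Or.inr ⟨b, by simp [hbt], rfl, hp⟩
      · rintro (hs | ⟨b, hb, rfl, hp⟩)
        · exact Or.inl ((PySem.Set.mem_add _ _ _).mpr (Or.inl hs))
        · rcases List.mem_cons.mp hb with rfl | hbt
          · exact Or.inl ((PySem.Set.mem_add _ _ _).mpr (Or.inr rfl))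
          · exact Or.inr ⟨b, hbt, rfl, hp⟩
    · rw [if_neg h]
      constructor
      · rintro (hs | ⟨b, hb, rfl, hp⟩)
        · exact Or.inl hs
        · exact Or.inr ⟨b, by simp [hb], rfl, hp⟩
      · rintro (hs | ⟨b, hb, rfl, hp⟩)
        · exact Or.inl hs
        · rcases List.mem_cons.mp hb with rfl | hbt
          · exact absurd hp h
          · exact Or.inr ⟨b, hbt, rfl, hp⟩

-- membership in a nested conditional-add fold
lemma mem_foldl_foldl_addIf {α β : Type} (f : α → β → String) (P : String → Bool)
    (l : List α) (h : α → List β) :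
    ∀ (s : PySem.Set String) (v : String),
      (v ∈ l.foldl (fun s a => (h a).foldl
          (fun s b => if P (f a b) then PySem.Set.add s (f a b) else s) s) s) ↔
        v ∈ s ∨ ∃ a ∈ l, ∃ b ∈ h a, f a b = v ∧ P v = true := by
  induction l with
  | nil => simp
  | cons a t ih =>
    intro s v
    rw [List.foldl_cons, ih, mem_foldl_addIf (f a) P (h a)]
    simp only [List.mem_cons]
    constructor
    · rintro ((hs | ⟨b, hb, hfb, hp⟩) | ⟨a', ha', b, hb, hfb, hp⟩)
      · exact Or.inl hs
      · exact Or.inr ⟨a, Or.inl rfl, b, hb, hfb, hp⟩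
      · exact Or.inr ⟨a', Or.inr ha', b, hb, hfb, hp⟩
    · rintro (hs | ⟨a', rfl | ha', b, hb, hfb, hp⟩)
      · exact Or.inl (Or.inl hs)
      · exact Or.inl (Or.inr ⟨b, hb, hfb, hp⟩)
      · exact Or.inr ⟨a', ha', b, hb, hfb, hp⟩

-- membership in a nested unconditional-add fold
lemma mem_foldl_add {β : Type} (f : β → String) (l : List β) :
    ∀ (s : PySem.Set String) (v : String),
      (v ∈ l.foldl (fun s b => PySem.Set.add s (f b)) s) ↔ v ∈ s ∨ ∃ b ∈ l, f b = v := by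
  induction l with
  | nil => simp
  | cons a t ih =>
    intro s v
    rw [List.foldl_cons, ih]
    simp only [PySem.Set.mem_add, List.mem_cons]
    constructor
    · rintro ((hs | rfl) | ⟨b, hb, hfb⟩)
      · exact Or.inl hs
      · exact Or.inr ⟨a, Or.inl rfl, rfl⟩
      · exact Or.inr ⟨b, Or.inr hb, hfb⟩
    · rintro (hs | ⟨b, rfl | hb, hfb⟩)
      · exact Or.inl (Or.inl hs)
      · exact Or.inl (Or.inr hfb.symm)
      · exact Or.inr ⟨b, hb, hfb⟩

lemma mem_foldl_foldl_add {α β : Type} (f : α → β → String) (l : List α) (h : α → List β) :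
    ∀ (s : PySem.Set String) (v : String),
      (v ∈ l.foldl (fun s a => (h a).foldl (fun s b => PySem.Set.add s (f a b)) s) s) ↔
        v ∈ s ∨ ∃ a ∈ l, ∃ b ∈ h a, f a b = v := by
  induction l with
  | nil => simp
  | cons a t ih =>
    intro s v
    rw [List.foldl_cons, ih, mem_foldl_add (f a) (h a)]
    simp only [List.mem_cons]
    constructor
    · rintro ((hs | ⟨b, hb, hfb⟩) | ⟨a', ha', b, hb, hfb⟩)
      · exact Or.inl hs
      · exact Or.inr ⟨a, Or.inl rfl, b, hb, hfb⟩
      · exact Or.inr ⟨a', Or.inr ha', b, hb, hfb⟩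
    · rintro (hs | ⟨a', rfl | ha', b, hb, hfb⟩)
      · exact Or.inl (Or.inl hs)
      · exact Or.inl (Or.inr ⟨b, hb, hfb⟩)
      · exact Or.inr ⟨a', ha', b, hb, hfb⟩

-- drop/take window = nonempty infix
lemma pv_window_iff (L v : List Char) :
    (∃ jn kn : Nat, 1 ≤ kn ∧ jn + kn ≤ L.length ∧ (L.drop jn).take kn = v) ↔
      (v ≠ [] ∧ v <:+: L) := by
  constructor
  · rintro ⟨jn, kn, hk, hjk, rfl⟩
    have hlen : ((L.drop jn).take kn).length = kn := by
      simp [List.length_take, List.length_drop]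
      omega
    refine ⟨?_, ((L.drop jn).take_prefix kn).isInfix.trans (L.drop_suffix jn).isInfix⟩
    intro hnil
    rw [hnil] at hlen
    simp at hlen
    omega
  · rintro ⟨hne, pre, post, rfl⟩
    refine ⟨pre.length, v.length, ?_, by simp, ?_⟩
    · cases v with
      | nil => exact absurd rfl hne
      | cons _ _ => simp
    · rw [List.append_assoc, List.drop_left, List.take_left]

lemma pv_slice_toList (s : String) (i j : Int) (hi : 0 ≤ i) (hj : 0 ≤ j) :
    (PySem.Str.slice s (some i) (some j)).toList =
      (s.toList.drop i.toNat).take (j.toNat - i.toNat) := by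
  rw [PySem.Str.toList_slice, PySem.Chars.slice_eq_listSlice,
    PySem.List.slice_toNat s.toList hi hj]

lemma mem_pvSlicePassA (value1 : String)
    (step : PySem.Set String → String → PySem.Set String) (P : String → Bool)
    (hstep : ∀ s x, step s x = if P x then PySem.Set.add s x else s)
    (init : PySem.Set String) (v : String) :
    v ∈ pvSlicePassA value1 step init ↔ v ∈ init ∨ (pvNES v value1 ∧ P v = true) := by
  unfold pvSlicePassA
  simp only [hstep]
  rw [mem_foldl_foldl_addIf
    (fun k j => PySem.Str.slice value1 (some j) (some (j + k))) P
    (PySem.List.pyRange 1 (PySem.Str.len value1 + 1))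
    (fun k => PySem.List.pyRange 0 (PySem.Str.len value1 - k + 1))]
  have hlen : PySem.Str.len value1 = (value1.toList.length : Int) := PySem.Str.len_eq value1
  refine or_congr_right ?_
  constructor
  · rintro ⟨k, hk, j, hj, hs, hp⟩
    rw [PySem.List.mem_pyRange_one, hlen] at hk hj
    refine ⟨?_, hp⟩
    unfold pvNES
    rw [← pv_window_iff]
    refine ⟨j.toNat, k.toNat, by omega, by omega, ?_⟩
    have := congrArg String.toList hs
    rw [pv_slice_toList value1 j (j + k) (by omega) (by omega)] at this
    rw [← this]
    congr 1
    omega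
  · rintro ⟨hnes, hp⟩
    unfold pvNES at hnes
    rw [← pv_window_iff] at hnes
    obtain ⟨jn, kn, hk, hjk, hw⟩ := hnes
    refine ⟨(kn : Int), ?_, (jn : Int), ?_, ?_, hp⟩
    · rw [PySem.List.mem_pyRange_one, hlen]
      omega
    · rw [PySem.List.mem_pyRange_one, hlen]
      omega
    · rw [← String.toList_inj,
        pv_slice_toList value1 (jn : Int) ((jn : Int) + (kn : Int)) (by omega) (by omega)]
      rw [← hw]
      congr 1
      omega

lemma mem_pvSubsB (s v : String) : v ∈ pvSubsB s ↔ pvNES v s := by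
  unfold pvSubsB
  rw [mem_foldl_foldl_add
    (fun i j => PySem.Str.slice s (some i) (some j))
    (PySem.List.pyRange 0 (PySem.Str.len s))
    (fun i => PySem.List.pyRange (i + 1) (PySem.Str.len s + 1))]
  have hlen : PySem.Str.len s = (s.toList.length : Int) := PySem.Str.len_eq s
  have hempty : ¬ v ∈ (PySem.Set.empty : PySem.Set String) := by
    simp [PySem.Set.empty]
  simp only [hempty, false_or]
  unfold pvNES
  rw [← pv_window_iff]
  constructor
  · rintro ⟨i, hi, j, hj, hs⟩
    rw [PySem.List.mem_pyRange_one, hlen] at hi hj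
    refine ⟨i.toNat, j.toNat - i.toNat, by omega, by omega, ?_⟩
    have := congrArg String.toList hs
    rw [pv_slice_toList s i j (by omega) (by omega)] at this
    exact this
  · rintro ⟨jn, kn, hk, hjk, hw⟩
    refine ⟨(jn : Int), ?_, ((jn : Int) + (kn : Int)), ?_, ?_⟩
    · rw [PySem.List.mem_pyRange_one, hlen]
      omega
    · rw [PySem.List.mem_pyRange_one, hlen]
      omega
    · rw [← String.toList_inj,
        pv_slice_toList s (jn : Int) ((jn : Int) + (kn : Int)) (by omega) (by omega)]
      rw [← hw]
      congr 1
      omega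

lemma pv_nodup_foldl {α : Type} (step : PySem.Set String → α → PySem.Set String)
    (hstep : ∀ s x, s.Nodup → (step s x).Nodup) :
    ∀ (l : List α) (s : PySem.Set String), s.Nodup → (l.foldl step s).Nodup := by
  intro l
  induction l with
  | nil => intro s hs; exact hs
  | cons a t ih => intro s hs; exact ih _ (hstep _ _ hs)

lemma nodup_pvSubsB (s : String) : (pvSubsB s).Nodup := by
  unfold pvSubsB
  refine pv_nodup_foldl _ ?_ _ _ (by simp [PySem.Set.empty])
  intro acc i hacc
  exact pv_nodup_foldl _ (fun s' x h => PySem.Set.nodup_add s' _ h) _ _ hacc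

lemma mem_pvDong (value1 : String) (values : List String) (v : String) :
    v ∈ pvDong value1 values ↔
      ∃ v2 ∈ values, value1 ≠ v2 ∧ pvNES v value1 ∧ PySem.Str.isIn v v2 = true := by
  unfold pvDong
  have haux : ∀ (l : List String) (s : PySem.Set String),
      (v ∈ l.foldl (fun pd value2 =>
        if value1 == value2 then pd
        else pvSlicePassA value1
          (fun pd x => if PySem.Str.isIn x value2 then PySem.Set.add pd x else pd) pd) s) ↔
        v ∈ s ∨ ∃ v2 ∈ l, value1 ≠ v2 ∧ pvNES v value1 ∧ PySem.Str.isIn v v2 = true := by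
    intro l
    induction l with
    | nil => simp
    | cons v2 t ih =>
      intro s
      rw [List.foldl_cons]
      by_cases h : (value1 == v2) = true
      · rw [if_pos h, ih]
        have heq : value1 = v2 := eq_of_beq h
        simp only [List.mem_cons]
        constructor
        · rintro (hs | ⟨w, hw, hne, hrest⟩)
          · exact Or.inl hs
          · exact Or.inr ⟨w, Or.inr hw, hne, hrest⟩
        · rintro (hs | ⟨w, rfl | hw, hne, hrest⟩)
          · exact Or.inl hs
          · exact absurd heq hne
          · exact Or.inr ⟨w, hw, hne, hrest⟩
      · rw [if_neg h, ih,
          mem_pvSlicePassA value1 _ (fun x => PySem.Str.isIn x v2) (fun _ _ => rfl)]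
        have hne : value1 ≠ v2 := by
          intro heq
          exact h (beq_iff_eq.mpr heq)
        simp only [List.mem_cons]
        constructor
        · rintro ((hs | ⟨hnes, hp⟩) | ⟨w, hw, hwne, hrest⟩)
          · exact Or.inl hs
          · exact Or.inr ⟨v2, Or.inl rfl, hne, hnes, hp⟩
          · exact Or.inr ⟨w, Or.inr hw, hwne, hrest⟩
        · rintro (hs | ⟨w, rfl | hw, hwne, hnes, hp⟩)
          · exact Or.inl (Or.inl hs)
          · exact Or.inl (Or.inr ⟨hnes, hp⟩)
          · exact Or.inr ⟨w, hw, hwne, hnes, hp⟩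
  rw [haux]
  simp [PySem.Set.empty]

lemma mem_pvChuKhacOne (value1 : String) (values : List String) (v : String) :
    v ∈ pvChuKhacOne value1 values ↔
      pvNES v value1 ∧ ∀ v2 ∈ values, value1 ≠ v2 → PySem.Str.isIn v v2 = false := by
  unfold pvChuKhacOne
  rw [mem_pvSlicePassA value1 _
    (fun x => !PySem.Set.contains (pvDong value1 values) x)
    (by
      intro s x
      cases hc : PySem.Set.contains (pvDong value1 values) x <;> simp only [hc] <;> simp)]
  have hempty : ¬ v ∈ (PySem.Set.empty : PySem.Set String) := by
    simp [PySem.Set.empty]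
  simp only [hempty, false_or, Bool.not_eq_true']
  constructor
  · rintro ⟨hnes, hnc⟩
    refine ⟨hnes, ?_⟩
    intro v2 hv2 hne
    cases hb : PySem.Str.isIn v v2 with
    | false => rfl
    | true =>
      exfalso
      have hmem : v ∈ pvDong value1 values :=
        (mem_pvDong value1 values v).mpr ⟨v2, hv2, hne, hnes, hb⟩
      rw [← PySem.Set.contains_iff] at hmem
      rw [hnc] at hmem
      exact Bool.false_ne_true hmem
  · rintro ⟨hnes, hall⟩
    refine ⟨hnes, ?_⟩
    cases hc : PySem.Set.contains (pvDong value1 values) v with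
    | false => rfl
    | true =>
      exfalso
      have hmem : v ∈ pvDong value1 values := (PySem.Set.contains_iff _ _).mp hc
      obtain ⟨v2, hv2, hne, _, hin⟩ := (mem_pvDong value1 values v).mp hmem
      have := hall v2 hv2 hne
      rw [this] at hin
      exact Bool.false_ne_true hin

lemma pvFreq_getD (cac : List String) (v : String) :
    (pvFreq cac).getD v 0 =
      ((PySem.List.dedup cac).countP (fun s => decide (v ∈ pvSubsB s)) : Int) := by
  unfold pvFreq
  rw [← List.foldl_flatMap, PySem.Dict.getD_foldl_modify_add_one]
  have hempty : (PySem.Dict.empty : PySem.Dict String Int).getD v 0 = 0 := by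
    simp [PySem.Dict.empty, PySem.Dict.getD, PySem.Dict.get?]
  rw [hempty, zero_add, List.count_flatMap]
  have hcount : ∀ s : String,
      (List.count v ∘ pvSubsB) s = if decide (v ∈ pvSubsB s) = true then 1 else 0 := by
    intro s
    by_cases h : v ∈ pvSubsB s
    · simp [Function.comp, h, List.count_eq_one_of_mem (nodup_pvSubsB s) h]
    · simp [Function.comp, h, List.count_eq_zero.mpr h]
  rw [funext hcount]
  have hsum : ∀ (l : List String),
      (l.map (fun x => if decide (v ∈ pvSubsB x) = true then (1 : Nat) else 0)).sum =
        l.countP (fun s => decide (v ∈ pvSubsB s)) := by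
    intro l
    induction l with
    | nil => simp
    | cons a t ih =>
      by_cases h : decide (v ∈ pvSubsB a) = true
      · simp only [List.map_cons, List.sum_cons, ih, List.countP_cons, h]
        omega
      · simp only [List.map_cons, List.sum_cons, ih, List.countP_cons,
          Bool.eq_false_iff.mpr h]
        simp
  rw [hsum]

lemma pv_countP_eq_one_iff {α : Type} (P : α → Bool) (l : List α) (hl : l.Nodup)
    (g : α) (hg : g ∈ l) (hPg : P g = true) :
    l.countP P = 1 ↔ ∀ s ∈ l, s ≠ g → P s = false := by
  induction l with
  | nil => cases hg
  | cons a t ih =>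
    rw [List.countP_cons]
    rcases List.mem_cons.mp hg with rfl | hgt
    · have hat : g ∉ t := (List.nodup_cons.mp hl).1
      rw [if_pos hPg]
      constructor
      · intro h1 s hs hne
        rcases List.mem_cons.mp hs with rfl | hst
        · exact absurd rfl hne
        · cases hP : P s with
          | false => rfl
          | true =>
            exfalso
            have : 0 < t.countP P := List.countP_pos_iff.mpr ⟨s, hst, hP⟩
            omega
      · intro h
        have : t.countP P = 0 := by
          rw [List.countP_eq_zero]
          intro s hs
          have hne : s ≠ g := fun heq => hat (heq ▸ hs)
          rw [h s (List.mem_cons_of_mem _ hs) hne]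
          simp
        omega
    · have hne : a ≠ g := by
        rintro rfl
        exact (List.nodup_cons.mp hl).1 hgt
      have hrec := ih (List.nodup_cons.mp hl).2 hgt
      by_cases hPa : P a = true
      · rw [if_pos hPa]
        have hpos : 0 < t.countP P := List.countP_pos_iff.mpr ⟨g, hgt, hPg⟩
        constructor
        · intro h1
          exfalso
          omega
        · intro h
          exact absurd (h a List.mem_cons_self hne) (by simp [hPa])
      · rw [if_neg hPa, add_zero, hrec]
        constructor
        · intro h s hs hsne
          rcases List.mem_cons.mp hs with rfl | hst
          · exact Bool.eq_false_iff.mpr hPa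
          · exact h s hst hsne
        · intro h s hs hsne
          exact h s (List.mem_cons_of_mem _ hs) hsne

lemma pvInnerA_eq (l : List String) (grp value : String) :
    pvInnerA l grp value = if l.any (fun u => PySem.Str.isIn u value) then grp else value := by
  induction l with
  | nil => simp [pvInnerA]
  | cons u rest ih =>
    by_cases h : PySem.Chars.isIn u.toList value.toList = true
    · simp [pvInnerA, h]
    · simp [pvInnerA, h, ih]

lemma pv_match_iff (value g : String) (cac : List String) (hg : g ∈ cac) :
    ((pvChuKhacOne g cac).any (fun u => PySem.Str.isIn u value)) =
      ((pvSubsB g).any (fun v =>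
        PySem.Str.isIn v value && ((pvFreq cac).getD v 0 == 1))) := by
  have hgd : g ∈ PySem.List.dedup cac := (PySem.List.mem_dedup cac g).mpr hg
  rw [Bool.eq_iff_iff]
  simp only [List.any_eq_true, Bool.and_eq_true, beq_iff_eq]
  constructor
  · rintro ⟨u, hu, hiu⟩
    obtain ⟨hnes, hall⟩ := (mem_pvChuKhacOne g cac u).mp hu
    refine ⟨u, (mem_pvSubsB g u).mpr hnes, hiu, ?_⟩
    rw [pvFreq_getD]
    norm_cast
    rw [pv_countP_eq_one_iff _ _ (PySem.List.nodup_dedup cac) g hgd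
      (by simp [mem_pvSubsB, hnes])]
    intro s hs hsg
    simp only [decide_eq_false_iff_not, mem_pvSubsB]
    rintro ⟨hne, hinf⟩
    have h2 : PySem.Str.isIn u s = true := (PySem.Str.isIn_iff_infix u s).mpr hinf
    have h3 := hall s ((PySem.List.mem_dedup cac s).mp hs) (Ne.symm hsg)
    rw [h3] at h2
    exact Bool.false_ne_true h2
  · rintro ⟨u, hu, hiu, hfreq⟩
    have hnes := (mem_pvSubsB g u).mp hu
    refine ⟨u, ?_, hiu⟩
    rw [mem_pvChuKhacOne]
    refine ⟨hnes, ?_⟩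
    rw [pvFreq_getD] at hfreq
    norm_cast at hfreq
    rw [pv_countP_eq_one_iff _ _ (PySem.List.nodup_dedup cac) g hgd
      (by simp [mem_pvSubsB, hnes])] at hfreq
    intro v2 hv2 hne
    cases hb : PySem.Str.isIn u v2 with
    | false => rfl
    | true =>
      exfalso
      have hv2d := hfreq v2 ((PySem.List.mem_dedup cac v2).mpr hv2) (Ne.symm hne)
      simp only [decide_eq_false_iff_not, mem_pvSubsB] at hv2d
      exact hv2d ⟨hnes.1, (PySem.Str.isIn_iff_infix u v2).mp hb⟩

-- ===== VERDICT (by name: the statement is the Claim_ definition above) =====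
theorem DinhDang2_spec : Claim_equal_DinhDang2 := by
  intro value cac _
  unfold Spec_DinhDang2 DinhDang2 DinhDang2_alt
  by_cases hn : value == "nan"
  · simp [hn]
  · simp only [hn, Bool.false_eq_true, if_false]
    have hmap : chukhacnhau cac = cac.map (fun v1 => pvChuKhacOne v1 cac) := by
      unfold chukhacnhau
      rw [PySem.List.foldl_append_singleton_eq_map]
      simp
    rw [hmap]
    have hz : (cac.map (fun v1 => pvChuKhacOne v1 cac)).zip cac =
        cac.map (fun a => (pvChuKhacOne a cac, a)) := by
      calc (cac.map (fun v1 => pvChuKhacOne v1 cac)).zip cac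
          = (cac.map (fun v1 => pvChuKhacOne v1 cac)).zip (cac.map id) := by rw [List.map_id]
        _ = cac.map (fun a => (pvChuKhacOne a cac, id a)) := List.zip_map'
    rw [hz, List.foldl_map]
    apply PySem.List.foldl_congr_mem'
    intro g hg acc
    rw [pvInnerA_eq, pv_match_iff acc g cac hg]
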